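-- pv_equiv track=rewrite | github.com/Diogo-Serra/codedex.io | Daily_Challenge/oscars_1603.py | oscar_pool
-- ===== SOURCE A (Python) =====
-- def oscar_pool(predictions):
--     winners = (
--         "One Battle After Another",
--         "Michael B. Jordan",
--         "Jessie Buckley",
--         "Paul Thomas Anderson",
--     )
--
--     best_name = None
--     best_correct = -1
--     is_tie = False
--
--     for friend in predictions:
--         name = friend[0]
--         picks = friend[1:]
--
--         correct = 0
--         for i in range(4):
--             if picks[i] == winners[i]:
--                 correct += 1
--
--         if correct > best_correct:
--             best_correct = correct
--             best_name = name
--             is_tie = False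
--         elif correct == best_correct:
--             is_tie = True
--
--     if is_tie:
--         return "Tie"
--     return best_name
-- ===== SOURCE B (Python) =====
-- def oscar_pool(predictions):
--     winners = (
--         "One Battle After Another",
--         "Michael B. Jordan",
--         "Jessie Buckley",
--         "Paul Thomas Anderson",
--     )
--
--     scores = []
--     for friend in predictions:
--         picks = friend[1:]
--         correct = sum(1 for i in range(4) if picks[i] == winners[i])
--         scores.append((friend[0], correct))
--
--     if not scores:
--         return None
--     best = max(c for _, c in scores)
--     if sum(1 for _, c in scores if c == best) >= 2:
--         return "Tie"
--     return next(n for n, c in scores if c == best)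
-- ===== Notes on version B (the rewrite author's own statement) =====
-- stated objective: alternative
-- what changed: Replaces A's single-pass running-best/tie-flag state machine by a two-phase decomposition: build a (name, score) list, then compute the maximum, count how often it occurs (>=2 gives 'Tie') and otherwise return the first name achieving it.
-- outside the precondition, e.g. on oscar_pool([]): A returns None, B returns None
import Mathlib
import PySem

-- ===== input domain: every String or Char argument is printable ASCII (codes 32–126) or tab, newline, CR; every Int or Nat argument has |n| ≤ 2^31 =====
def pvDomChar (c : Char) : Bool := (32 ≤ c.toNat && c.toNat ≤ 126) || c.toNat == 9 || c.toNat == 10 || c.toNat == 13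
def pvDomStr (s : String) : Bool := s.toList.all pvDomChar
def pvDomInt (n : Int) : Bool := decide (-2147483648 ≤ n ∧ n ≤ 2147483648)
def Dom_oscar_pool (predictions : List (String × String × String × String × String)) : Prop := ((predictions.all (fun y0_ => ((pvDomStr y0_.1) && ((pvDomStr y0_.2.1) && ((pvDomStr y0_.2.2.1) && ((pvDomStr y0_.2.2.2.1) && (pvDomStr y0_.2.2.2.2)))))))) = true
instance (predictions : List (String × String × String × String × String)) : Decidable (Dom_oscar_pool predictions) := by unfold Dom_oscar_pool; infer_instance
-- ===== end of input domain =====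

-- B replaces A's running-best/tie-flag state machine by a score-list + max/count/find decomposition (alternative, same cost).

-- ===== PORT A =====
def pvWinners : List String :=
  ["One Battle After Another", "Michael B. Jordan", "Jessie Buckley", "Paul Thomas Anderson"]

-- picks = friend[1:]
def pvPicks (friend : String × String × String × String × String) : List String :=
  [friend.2.1, friend.2.2.1, friend.2.2.2.1, friend.2.2.2.2]

-- A's inner loop: for i in range(4): if picks[i] == winners[i]: correct += 1
def pvCorrectA (friend : String × String × String × String × String) : Int :=
  (PySem.List.pyRange 0 4 1).foldl
    (fun correct i =>
      if (PySem.List.pyGet? (pvPicks friend) i == PySem.List.pyGet? pvWinners i) then correct + 1 else correct) 0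

-- state = (best_name, best_correct, is_tie); on empty input Python A returns None (not a str): excluded by Pre_, port yields ""
def oscar_pool (predictions : List (String × String × String × String × String)) : String :=
  let st := predictions.foldl
    (fun st friend =>
      let name := friend.1
      let correct := pvCorrectA friend
      if correct > st.2.1 then (some name, correct, false)
      else if correct = st.2.1 then (st.1, st.2.1, true)
      else st)
    ((none : Option String), (-1 : Int), false)
  if st.2.2 then "Tie" else st.1.getD ""

-- ===== PORT B =====
-- sum(1 for i in range(4) if picks[i] == winners[i])
def pvScoreB (friend : String × String × String × String × String) : Int :=
  (((PySem.List.pyRange 0 4 1).filter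
      (fun i => (PySem.List.pyGet? (pvPicks friend) i == PySem.List.pyGet? pvWinners i))).length : Int)

-- on empty input Python B returns None (not a str): excluded by Pre_, port yields ""
def oscar_pool_alt (predictions : List (String × String × String × String × String)) : String :=
  let scores := predictions.map (fun friend => (friend.1, pvScoreB friend))
  match scores with
  | [] => ""
  | s :: rest =>
    let best := rest.foldl (fun m p => max m p.2) s.2
    if 2 ≤ ((s :: rest).countP (fun p => p.2 == best)) then "Tie"
    else (((s :: rest).find? (fun p => p.2 == best)).map Prod.fst).getD ""

-- ===== PRECONDITION & SPEC =====
-- On an empty prediction list both Pythons return None, which is not a value of the declared str return type; Pre_ excludes it.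
def Pre_oscar_pool (predictions : List (String × String × String × String × String)) : Prop :=
  predictions ≠ []
instance (predictions : List (String × String × String × String × String)) : Decidable (Pre_oscar_pool predictions) := by unfold Pre_oscar_pool; infer_instance
def pvWitness_oscar_pool : (List (String × String × String × String × String)) :=
  [("alice", "One Battle After Another", "x", "Jessie Buckley", "y")]
def Spec_oscar_pool (predictions : List (String × String × String × String × String)) (out : String) : Prop := out = oscar_pool_alt predictions
instance (predictions : List (String × String × String × String × String)) (out : String) : Decidable (Spec_oscar_pool predictions out) := by unfold Spec_oscar_pool; infer_instance

-- ===== CLAIM (what is proved, stated in full; the proofs are below) =====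
def Claim_equal_oscar_pool : Prop := ∀ (predictions : List (String × String × String × String × String)), Dom_oscar_pool predictions → Pre_oscar_pool predictions → Spec_oscar_pool predictions (oscar_pool predictions)


-- ===== LEMMAS AND PROOFS =====

-- generic score-list machinery (scores : List (name, score))

def pvStep (st : Option String × Int × Bool) (p : String × Int) : Option String × Int × Bool :=
  if p.2 > st.2.1 then (some p.1, p.2, false)
  else if p.2 = st.2.1 then (st.1, st.2.1, true)
  else st

def pvBest (s : List (String × Int)) : Int :=
  match s with
  | [] => -1
  | x :: rest => rest.foldl (fun m p => max m p.2) x.2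

theorem pv_foldl_max_ge {l : List (String × Int)} {a : Int} :
    a ≤ l.foldl (fun m p => max m p.2) a := by
  induction l generalizing a with
  | nil => simp
  | cons x t ih => exact le_trans (le_max_left a x.2) ih

theorem pv_foldl_max_mem {l : List (String × Int)} {a : Int} {p : String × Int}
    (hp : p ∈ l) : p.2 ≤ l.foldl (fun m p => max m p.2) a := by
  induction l generalizing a with
  | nil => cases hp
  | cons x t ih =>
    rcases List.mem_cons.mp hp with h | h
    · subst h; exact le_trans (le_max_right a p.2) pv_foldl_max_ge
    · exact ih h

theorem pv_foldl_max_attained {l : List (String × Int)} {a : Int} :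
    l.foldl (fun m p => max m p.2) a = a ∨
      ∃ p ∈ l, p.2 = l.foldl (fun m p => max m p.2) a := by
  induction l generalizing a with
  | nil => left; rfl
  | cons x t ih =>
    rcases @ih (max a x.2) with h | ⟨p, hp, he⟩
    · rcases max_choice a x.2 with hm | hm
      · left; simpa [List.foldl, hm] using h
      · right; exact ⟨x, List.mem_cons_self, by simp [List.foldl]; rw [h, hm]⟩
    · right; exact ⟨p, List.mem_cons_of_mem _ hp, he⟩

theorem pvBest_mem_le {s : List (String × Int)} {p : String × Int} (hp : p ∈ s) :
    p.2 ≤ pvBest s := by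
  cases s with
  | nil => cases hp
  | cons x rest =>
    rcases List.mem_cons.mp hp with h | h
    · subst h; exact pv_foldl_max_ge
    · exact pv_foldl_max_mem h

theorem pvBest_attained {s : List (String × Int)} (hs : s ≠ []) :
    ∃ p ∈ s, p.2 = pvBest s := by
  cases s with
  | nil => exact absurd rfl hs
  | cons x rest =>
    rcases @pv_foldl_max_attained rest x.2 with h | ⟨p, hp, he⟩
    · exact ⟨x, List.mem_cons_self, h.symm⟩
    · exact ⟨p, List.mem_cons_of_mem _ hp, he⟩

theorem pvBest_append {s : List (String × Int)} (x : String × Int) (hs : s ≠ []) :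
    pvBest (s ++ [x]) = max (pvBest s) x.2 := by
  cases s with
  | nil => exact absurd rfl hs
  | cons y rest => simp [pvBest, List.foldl_append]

-- B's decision on a score list
def pvDecide (s : List (String × Int)) : String :=
  if 2 ≤ (s.countP (fun p => p.2 == pvBest s)) then "Tie"
  else ((s.find? (fun p => p.2 == pvBest s)).map Prod.fst).getD ""

-- characterisation of A's fold state
theorem pv_runA (s : List (String × Int)) (hs : s ≠ []) (h0 : ∀ p ∈ s, 0 ≤ p.2) :
    s.foldl pvStep ((none : Option String), (-1 : Int), false) =
      ((s.find? (fun p => p.2 == pvBest s)).map Prod.fst, pvBest s,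
        decide (2 ≤ s.countP (fun p => p.2 == pvBest s))) := by
  induction s using List.reverseRecOn with
  | nil => exact absurd rfl hs
  | append_singleton t x ih =>
    by_cases ht : t = []
    · subst ht
      have hx : 0 ≤ x.2 := h0 x (by simp)
      simp [pvStep, pvBest, List.countP, List.countP.go]
      omega
    · have h0' : ∀ p ∈ t, 0 ≤ p.2 := fun p hp => h0 p (List.mem_append_left _ hp)
      have hB := pvBest_append x ht
      rw [List.foldl_append, ih ht h0']
      obtain ⟨q, hq, hqe⟩ := pvBest_attained ht
      have hfind : (t.find? (fun p => p.2 == pvBest t)).isSome := by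
        apply List.find?_isSome.mpr
        exact ⟨q, hq, by simp [hqe]⟩
      have hcnt1 : 1 ≤ t.countP (fun p => p.2 == pvBest t) := by
        exact List.countP_pos_iff.mpr ⟨q, hq, by simp [hqe]⟩
      rcases lt_trichotomy x.2 (pvBest t) with hlt | heq | hgt
      · -- x.2 < best t : state unchanged
        have hb : pvBest (t ++ [x]) = pvBest t := by rw [hB]; omega
        simp only [pvStep, List.foldl, hb]
        rw [if_neg (by omega), if_neg (by omega)]
        have : (t ++ [x]).find? (fun p => p.2 == pvBest t)
             = t.find? (fun p => p.2 == pvBest t) := by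
          rw [List.find?_append]
          rcases Option.isSome_iff_exists.mp hfind with ⟨v, hv⟩
          simp [hv]
        rw [this, List.countP_append]
        have hbx : (x.2 == pvBest t) = false := by simp; omega
        simp [hbx]
      · -- x.2 = best t : tie
        have hb : pvBest (t ++ [x]) = pvBest t := by rw [hB]; omega
        simp only [pvStep, List.foldl, hb]
        rw [if_neg (by omega), if_pos heq]
        have hfeq : (t ++ [x]).find? (fun p => p.2 == pvBest t)
             = t.find? (fun p => p.2 == pvBest t) := by
          rw [List.find?_append]
          rcases Option.isSome_iff_exists.mp hfind with ⟨v, hv⟩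
          simp [hv]
        rw [hfeq, List.countP_append]
        have hbx : (x.2 == pvBest t) = true := by simp [heq]
        have hx1 : [x].countP (fun p => p.2 == pvBest t) = 1 := by
          simp [hbx]
        rw [hx1]
        have h2 : 2 ≤ t.countP (fun p => p.2 == pvBest t) + 1 := by omega
        simp [h2]
      · -- x.2 > best t : new leader
        have hb : pvBest (t ++ [x]) = x.2 := by rw [hB]; omega
        simp only [pvStep, List.foldl, hb]
        rw [if_pos (by omega)]
        have hnone : t.find? (fun p => p.2 == x.2) = none := by
          rw [List.find?_eq_none]
          intro p hp
          have := pvBest_mem_le hp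
          simp; omega
        have : (t ++ [x]).find? (fun p => p.2 == x.2) = some x := by
          rw [List.find?_append, hnone]
          simp
        rw [this, List.countP_append]
        have ht0 : t.countP (fun p => p.2 == x.2) = 0 := by
          rw [List.countP_eq_zero]
          intro p hp
          have := pvBest_mem_le hp
          simp; omega
        have hx1 : ([x].countP (fun p => p.2 == x.2)) = 1 := by
          simp [List.countP, List.countP.go]
        rw [ht0, hx1]
        simp

theorem pv_foldl_count {α : Type} (p : α → Bool) (l : List α) (c : Int) :
    l.foldl (fun c i => if p i then c + 1 else c) c = c + ((l.filter p).length : Int) := by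
  induction l generalizing c with
  | nil => simp
  | cons a t ih =>
    by_cases h : p a <;> simp [List.foldl, List.filter, h, ih] <;> ring

theorem pvCorrect_eq_score (f : String × String × String × String × String) :
    pvCorrectA f = pvScoreB f := by
  rw [pvCorrectA, pvScoreB, pv_foldl_count]
  simp

theorem pvScore_nonneg (f : String × String × String × String × String) :
    0 ≤ pvScoreB f := by
  simp [pvScoreB]

-- ===== VERDICT (by name: the statement is the Claim_ definition above) =====
theorem oscar_pool_spec : Claim_equal_oscar_pool := by
  intro preds _ hpre
  cases preds with
  | nil => exact absurd rfl hpre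
  | cons g gs =>
    unfold Spec_oscar_pool oscar_pool oscar_pool_alt
    simp only [pvCorrect_eq_score]
    have hm : (g :: gs).foldl
        (fun st friend =>
          let name := friend.1
          let correct := pvScoreB friend
          if correct > st.2.1 then (some name, correct, false)
          else if correct = st.2.1 then (st.1, st.2.1, true)
          else st)
        ((none : Option String), (-1 : Int), false)
        = ((g :: gs).map (fun f => (f.1, pvScoreB f))).foldl pvStep
            ((none : Option String), (-1 : Int), false) := by
      rw [List.foldl_map]
      rfl
    have h0 : ∀ p ∈ (g :: gs).map (fun f => (f.1, pvScoreB f)), 0 ≤ p.2 := by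
      intro p hp
      obtain ⟨f, _, rfl⟩ := List.mem_map.mp hp
      exact pvScore_nonneg f
    rw [hm, pv_runA _ (by simp) h0]
    simp only [List.map_cons]
    by_cases h2 : 2 ≤ ((g.1, pvScoreB g) :: gs.map (fun f => (f.1, pvScoreB f))).countP
        (fun p => p.2 == pvBest ((g.1, pvScoreB g) :: gs.map (fun f => (f.1, pvScoreB f))))
    · simp only [pvBest] at h2 ⊢
      simp [h2]
    · simp only [pvBest] at h2 ⊢
      simp [h2]
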